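-- pv_equiv track=rewrite | github.com/TotoFederici/Facu | PROG/python/ejer4.py | natMenores
-- ===== SOURCE A (Python) =====
-- def natMenores(l: list) -> set:
--     '''
--     recibe una lista de numeros naturales y devuelve un conjunto con los numeros naturales
--     anteriores al mayor de la lista yque no esten en la lista
--     '''
--     l.sort()
--     maximo = l[-1]
--     natAnteriores = []
--     for i in range(1, maximo):
--         if i not in l:
--             natAnteriores.append(i)
--     return natAnteriores
-- ===== SOURCE B (Python) =====
-- def natMenores(l: list) -> set:
--     l.sort()
--     maximo = l[-1]
--     res = []
--     nxt = 1
--     for x in l: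
--         if x >= maximo:
--             break
--         if x < nxt:
--             continue
--         res.extend(range(nxt, x))
--         nxt = x + 1
--     res.extend(range(nxt, maximo))
--     return res
-- ===== Notes on version B (the rewrite author's own statement) =====
-- stated objective: faster
-- what changed: Replaces the per-candidate 'i not in l' membership scan over range(1, maximo) with a single merge-style gap-filling pass over the sorted list using a next-expected counter.
import Mathlib
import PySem

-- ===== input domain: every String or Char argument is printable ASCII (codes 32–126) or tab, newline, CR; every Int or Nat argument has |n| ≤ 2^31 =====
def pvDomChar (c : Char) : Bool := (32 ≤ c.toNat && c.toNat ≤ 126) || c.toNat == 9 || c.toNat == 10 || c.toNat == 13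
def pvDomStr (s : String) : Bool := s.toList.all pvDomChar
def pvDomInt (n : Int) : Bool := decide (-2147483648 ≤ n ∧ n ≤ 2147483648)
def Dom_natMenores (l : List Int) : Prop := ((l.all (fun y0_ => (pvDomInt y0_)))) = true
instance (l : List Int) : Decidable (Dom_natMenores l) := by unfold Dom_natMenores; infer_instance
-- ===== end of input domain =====

-- B replaces the per-candidate membership scan with one merge-style gap-filling pass
-- over the sorted list (faster). Both A and B sort l in place in Python; the
-- equivalence proved here is about the return value.

-- ===== PORT A =====
def natMenores (l : List Int) : List Int :=
  -- l.sort(); maximo = l[-1]  (IndexError if empty)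
  match PySem.List.pyGet? (PySem.List.sorted l (fun x => x) false) (-1) with
  | none => []
  | some maximo =>
      (PySem.List.pyRange 1 maximo 1).foldl
        (fun acc i => if i ∈ PySem.List.sorted l (fun x => x) false then acc else acc ++ [i]) []

-- ===== PORT B =====
def natMenoresAltLoop (maximo : Int) : List Int → List Int × Int → List Int × Int
  | [], st => st
  | x :: xs, (res, nxt) =>
    if maximo ≤ x then (res, nxt)                  -- break
    else if x < nxt then natMenoresAltLoop maximo xs (res, nxt)   -- continue
    else natMenoresAltLoop maximo xs (res ++ PySem.List.pyRange nxt x 1, x + 1)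

def natMenores_alt (l : List Int) : List Int :=
  match PySem.List.pyGet? (PySem.List.sorted l (fun x => x) false) (-1) with
  | none => []
  | some maximo =>
    let st := natMenoresAltLoop maximo (PySem.List.sorted l (fun x => x) false) ([], 1)
    st.1 ++ PySem.List.pyRange st.2 maximo 1

-- ===== PRECONDITION & SPEC =====
-- A raises IndexError (l[-1]) on the empty list; B raises there too.
def Pre_natMenores (l : List Int) : Prop := l ≠ []
instance (l : List Int) : Decidable (Pre_natMenores l) := by unfold Pre_natMenores; infer_instance
def pvWitness_natMenores : List Int := [2, 5]

def Spec_natMenores (l : List Int) (out : List Int) : Prop := out = natMenores_alt l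
instance (l : List Int) (out : List Int) : Decidable (Spec_natMenores l out) := by unfold Spec_natMenores; infer_instance

-- ===== CLAIM (what is proved, stated in full; the proofs are below) =====
def Claim_equal_natMenores : Prop := ∀ (l : List Int), Dom_natMenores l → Pre_natMenores l → Spec_natMenores l (natMenores l)

-- ===== LEMMAS AND PROOFS =====

-- A's loop is a filter of the range.
theorem natMenores_foldA (s : List Int) (r : List Int) (acc : List Int) :
    r.foldl (fun acc i => if i ∈ s then acc else acc ++ [i]) acc
      = acc ++ r.filter (fun i => i ∉ s) := by
  induction r generalizing acc with
  | nil => simp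
  | cons x xs ih =>
      simp only [List.foldl_cons, List.filter_cons]
      by_cases hx : x ∈ s <;> simp [hx, ih]

-- B's merge pass produces the same filter, given the list is sorted.
theorem natMenoresAltLoop_spec (maximo : Int) :
    ∀ (t : List Int), t.Pairwise (· ≤ ·) → ∀ (res : List Int) (nxt : Int),
      (natMenoresAltLoop maximo t (res, nxt)).1
        ++ PySem.List.pyRange (natMenoresAltLoop maximo t (res, nxt)).2 maximo 1
      = res ++ (PySem.List.pyRange nxt maximo 1).filter (fun i => i ∉ t) := by
  intro t
  induction t with
  | nil =>
      intro _ res nxt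
      simp [natMenoresAltLoop]
  | cons x xs ih =>
      intro hp res nxt
      rw [List.pairwise_cons] at hp
      obtain ⟨hx, hxs⟩ := hp
      by_cases hbm : maximo ≤ x
      · -- break: everything in the range is below x, hence not in x :: xs
        simp only [natMenoresAltLoop, if_pos hbm]
        have : (PySem.List.pyRange nxt maximo 1).filter (fun i => i ∉ x :: xs)
            = PySem.List.pyRange nxt maximo 1 := by
          apply List.filter_eq_self.mpr
          intro i hi
          rw [PySem.List.mem_pyRange_one] at hi
          simp only [decide_eq_true_eq, List.mem_cons, not_or]
          constructor
          · omega
          · intro hmem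
            have := hx i hmem
            omega
        rw [this]
      · push_neg at hbm
        by_cases hlt : x < nxt
        · -- continue: x is below every range element, membership unaffected
          simp only [natMenoresAltLoop, if_neg (by omega : ¬ maximo ≤ x), if_pos hlt]
          rw [ih hxs res nxt]
          congr 1
          apply List.filter_congr
          intro i hi
          rw [PySem.List.mem_pyRange_one] at hi
          have hne : i ≠ x := by omega
          simp [List.mem_cons, hne]
        · -- fill the gap [nxt, x), skip x, recurse from x + 1
          push_neg at hlt
          simp only [natMenoresAltLoop, if_neg (by omega : ¬ maximo ≤ x),
            if_neg (by omega : ¬ x < nxt)]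
          rw [ih hxs (res ++ PySem.List.pyRange nxt x 1) (x + 1)]
          rw [PySem.List.pyRange_one_append nxt x maximo (by omega) (by omega),
              PySem.List.pyRange_one_append x (x + 1) maximo (by omega) (by omega),
              PySem.List.pyRange_one_singleton]
          rw [List.filter_append, List.filter_append]
          have h1 : (PySem.List.pyRange nxt x 1).filter (fun i => i ∉ x :: xs)
              = PySem.List.pyRange nxt x 1 := by
            apply List.filter_eq_self.mpr
            intro i hi
            rw [PySem.List.mem_pyRange_one] at hi
            simp only [decide_eq_true_eq, List.mem_cons, not_or]
            constructor
            · omega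
            · intro hmem
              have := hx i hmem
              omega
          have h2 : ([x] : List Int).filter (fun i => i ∉ x :: xs) = [] := by
            simp
          have h3 : (PySem.List.pyRange (x + 1) maximo 1).filter (fun i => i ∉ x :: xs)
              = (PySem.List.pyRange (x + 1) maximo 1).filter (fun i => i ∉ xs) := by
            apply List.filter_congr
            intro i hi
            rw [PySem.List.mem_pyRange_one] at hi
            have hne : i ≠ x := by omega
            simp [List.mem_cons, hne]
          rw [h1, h2, h3]
          simp

-- ===== VERDICT (by name: the statement is the Claim_ definition above) =====
theorem natMenores_spec : Claim_equal_natMenores := by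
  intro l _ hpre
  unfold Spec_natMenores natMenores natMenores_alt
  cases hget : PySem.List.pyGet? (PySem.List.sorted l (fun x => x) false) (-1) with
  | none => rfl
  | some maximo =>
      dsimp only
      rw [natMenores_foldA (PySem.List.sorted l (fun x => x) false) _ [],
          natMenoresAltLoop_spec maximo (PySem.List.sorted l (fun x => x) false)
            (PySem.List.sorted_pairwise l (fun x => x)) [] 1]
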